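-- pv_equiv track=rewrite | github.com/burakisler8/ADB-Telemetry-Health-Monitor | droidperf/charts.py | _group_records_by_package
-- ===== SOURCE A (Python) =====
-- from collections import defaultdict
-- from typing import Any, Dict, List, Optional, Tuple
--
-- def _group_records_by_package(
--     records: List[Dict[str, Any]]
-- ) -> Dict[str, List[Dict[str, Any]]]:
--     """
--     Partition *records* into per-package buckets.
--
--     When a record has a ``package`` key its value is used as the bucket
--     name; otherwise the record is assigned to the ``"device"`` bucket so
--     that legacy single-series data continues to work unchanged.
--
--     Args:
--         records (List[Dict]): Raw telemetry record list.
--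
--     Returns:
--         Dict[str, List[Dict]]: Mapping of package name → record list.
--     """
--     groups: Dict[str, List[Dict[str, Any]]] = defaultdict(list)
--     for record in records:
--         key = record.get("package") or "device"
--         groups[key].append(record)
--     return dict(groups)
-- ===== SOURCE B (Python) =====
-- def _group_records_by_package(records):
--     """Two-pass grouping: dedup keys in first-occurrence order, then one
--     filter per key, instead of a single scatter pass into a defaultdict."""
--     def key(r):
--         return r.get("package") or "device"
--     keys = list(dict.fromkeys(map(key, records)))
--     return {k: [r for r in records if key(r) == k] for k in keys}
-- ===== Notes on version B (the rewrite author's own statement) =====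
-- stated objective: alternative
-- what changed: Replaced the single scatter pass into a defaultdict with a two-pass scheme: dedup the keys in first-occurrence order, then build each bucket by filtering the record list once per key.
import Mathlib
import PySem

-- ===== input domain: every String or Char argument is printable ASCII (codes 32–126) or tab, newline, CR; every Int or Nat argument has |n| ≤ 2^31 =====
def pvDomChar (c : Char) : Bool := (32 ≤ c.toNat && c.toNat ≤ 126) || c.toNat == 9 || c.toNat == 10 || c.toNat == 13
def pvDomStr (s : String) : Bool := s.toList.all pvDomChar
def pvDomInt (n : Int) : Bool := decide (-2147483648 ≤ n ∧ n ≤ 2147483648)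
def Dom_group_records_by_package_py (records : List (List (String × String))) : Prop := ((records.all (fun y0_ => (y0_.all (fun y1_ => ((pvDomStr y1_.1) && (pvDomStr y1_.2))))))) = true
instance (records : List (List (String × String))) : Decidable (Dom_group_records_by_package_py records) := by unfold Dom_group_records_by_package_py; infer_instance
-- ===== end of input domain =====

-- B replaces A's defaultdict scatter pass by dedup-keys-then-filter-per-key (alternative decomposition, same return value).
-- ===== PORT A =====
-- record.get("package") or "device": first-match lookup; empty string is falsy
def pvKey (r : List (String × String)) : String :=
  match (PySem.Dict.mk r).get? "package" with
  | some v => if v = "" then "device" else v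
  | none => "device"

def group_records_by_package_py (records : List (List (String × String))) : List (String × List (List (String × String))) :=
  (records.foldl
    (fun (g : PySem.Dict String (List (List (String × String)))) r =>
      g.modify (pvKey r) [] (· ++ [r]))
    PySem.Dict.empty).items

-- ===== PORT B =====
def group_records_by_package_py_alt (records : List (List (String × String))) : List (String × List (List (String × String))) :=
  (PySem.List.dedup (records.map pvKey)).map
    (fun k => (k, records.filter (fun r => pvKey r == k)))

-- ===== PRECONDITION & SPEC =====
def Spec_group_records_by_package_py (records : List (List (String × String))) (out : List (String × List (List (String × String)))) : Prop := out = group_records_by_package_py_alt records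
instance (records : List (List (String × String))) (out : List (String × List (List (String × String)))) : Decidable (Spec_group_records_by_package_py records out) := by unfold Spec_group_records_by_package_py; infer_instance

-- ===== CLAIM (what is proved, stated in full; the proofs are below) =====
def Claim_equal_group_records_by_package_py : Prop := ∀ (records : List (List (String × String))), Dom_group_records_by_package_py records → Spec_group_records_by_package_py records (group_records_by_package_py records)

-- ===== LEMMAS AND PROOFS =====
theorem group_loop_eq_pairs (records : List (List (String × String))) :
    records.foldl
      (fun (g : PySem.Dict String (List (List (String × String)))) r =>
        g.modify (pvKey r) [] (· ++ [r]))
      PySem.Dict.empty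
    = (records.map (fun r => (pvKey r, r))).foldl
        (fun g p => g.modify p.1 [] (· ++ [p.2])) PySem.Dict.empty := by
  rw [List.foldl_map]

-- ===== VERDICT (by name: the statement is the Claim_ definition above) =====
theorem group_records_by_package_py_spec : Claim_equal_group_records_by_package_py := by
  intro records _
  unfold Spec_group_records_by_package_py group_records_by_package_py group_records_by_package_py_alt
  set d := records.foldl
      (fun (g : PySem.Dict String (List (List (String × String)))) r =>
        g.modify (pvKey r) [] (· ++ [r])) PySem.Dict.empty with hd
  have hnd : d.keys.Nodup := by
    rw [hd]
    exact PySem.Dict.nodup_keys_foldl_modify_key records pvKey []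
      (fun g r => (· ++ [r])) PySem.Dict.empty (by simp [pysem])
  have hkeys : d.keys = PySem.List.dedup (records.map pvKey) := by
    rw [hd, PySem.Dict.keys_foldl_modify_key]
    simp [pysem, PySem.Set.update, PySem.List.dedup_eq_ofList, PySem.Set.ofList_eq_foldl]
  have hget : ∀ k, d.getD k [] = records.filter (fun r => pvKey r == k) := by
    intro k
    rw [hd, group_loop_eq_pairs, PySem.Dict.getD_foldl_modify_append]
    simp [List.filter_map, Function.comp_def]
  rw [PySem.Dict.items_eq_map_keys d hnd [], hkeys]
  exact List.map_congr_left (fun k _ => by rw [hget k])
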